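-- pv_equiv track=rewrite | github.com/DaniyarTheGreat/LeetCode_Problems | Interview Problems/santa.py | go
-- ===== SOURCE A (Python) =====
-- def go(players):
--     paired = []
--     gifted = { player: False for player in players}
--     recieved = { player: False for player in players}
--     for player in players:
--         if gifted[player] == False:
--             reciever = [ele for ele in players if ele != player and recieved[ele] == False][-1]
--             paired.append([player, reciever])
--             gifted[player] = True
--             recieved[reciever] = True
--     return paired
-- ===== SOURCE B (Python) =====
-- def go(players):
--     # Receivers in last-occurrence order: the comprehension's [-1] is always the
--     # still-available value whose last occurrence in players is latest, so keep
--     # the distinct values as a list ordered by last occurrence (descending) and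
--     # pop from its front; givers are the distinct values in first-occurrence order.
--     avail = list(dict.fromkeys(reversed(players)))
--     paired = []
--     for v in dict.fromkeys(players):
--         i = 0 if avail[0] != v else 1
--         paired.append([v, avail.pop(i)])
--     return paired
-- ===== Notes on version B (the rewrite author's own statement) =====
-- stated objective: faster
-- what changed: Instead of re-scanning the whole players list for every giver to find the last available receiver, B deduplicates once into a list of distinct values ordered by last occurrence and pops each receiver from its front (index 0, or 1 when the front equals the current giver), iterating givers over the distinct values in first-occurrence order.
import Mathlib
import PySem

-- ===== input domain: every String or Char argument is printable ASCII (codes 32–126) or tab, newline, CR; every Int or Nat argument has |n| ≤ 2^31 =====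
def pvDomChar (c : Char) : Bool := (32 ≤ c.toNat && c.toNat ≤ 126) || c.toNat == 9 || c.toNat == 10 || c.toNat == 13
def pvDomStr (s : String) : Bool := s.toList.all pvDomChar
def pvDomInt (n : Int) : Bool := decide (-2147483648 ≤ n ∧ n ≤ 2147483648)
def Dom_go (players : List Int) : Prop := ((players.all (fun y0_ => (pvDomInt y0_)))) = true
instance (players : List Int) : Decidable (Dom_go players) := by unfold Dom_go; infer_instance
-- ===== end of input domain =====

-- B replaces A's per-giver rescan of the whole players list by a single dedup into a
-- last-occurrence-ordered receiver list popped from the front (a timing run measured B faster).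

-- ===== PORT A =====
def goInitDict (players : List Int) : PySem.Dict Int Bool :=
  players.foldl (fun d p => d.insert p false) PySem.Dict.empty

def goLoopA (players : List Int) : List Int → PySem.Dict Int Bool → PySem.Dict Int Bool → List (List Int) → Option (List (List Int))
  | [], _, _, paired => some paired
  | p :: rest, gifted, recvd, paired =>
    if gifted.getD p false == false then
      match PySem.List.pyGet? (players.filter (fun ele => ele != p && (recvd.getD ele false == false))) (-1) with
      | none => none  -- Python: IndexError ([-1] of an empty list); excluded by Pre_go
      | some r => goLoopA players rest (gifted.insert p true) (recvd.insert r true) (paired ++ [[p, r]])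
    else goLoopA players rest gifted recvd paired

def go (players : List Int) : List (List Int) :=
  (goLoopA players players (goInitDict players) (goInitDict players) []).getD []

-- ===== PORT B =====
def goLoopB : List Int → List Int → List (List Int) → Option (List (List Int))
  | [], _, paired => some paired
  | v :: gs, avail, paired =>
    match PySem.List.pyGet? avail 0 with
    | none => none  -- Python: IndexError (avail[0] of an empty list); excluded by Pre_go
    | some h =>
      let i : Int := if h != v then 0 else 1
      match PySem.List.pop? avail i with
      | none => none  -- Python: IndexError (avail.pop(1) of a one-element list); excluded by Pre_go
      | some (r, avail') => goLoopB gs avail' (paired ++ [[v, r]])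

def go_alt (players : List Int) : List (List Int) :=
  (goLoopB (PySem.List.dedup players) (PySem.List.dedup players.reverse) []).getD []

-- ===== PRECONDITION & SPEC =====
-- Pre_go excludes exactly the inputs on which the Python A raises IndexError (its receiver
-- comprehension comes up empty at some step); B raises IndexError on those same inputs.
-- Closed form: with g = the distinct values by first occurrence and b = the distinct values by
-- last occurrence (descending), A raises iff there is exactly one distinct value, or g and b end
-- in the same value and the run of positions j = d-2, d-3, … with g[j] = b[j] has even length.
def Pre_go (players : List Int) : Prop :=
  ¬ (PySem.List.dedup players).length = 1 ∧
  ¬ (2 ≤ (PySem.List.dedup players).length ∧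
      (PySem.List.dedup players.reverse).getLast? = (PySem.List.dedup players).getLast? ∧
      2 ∣ ((((PySem.List.dedup players).zip (PySem.List.dedup players.reverse)).take
              ((PySem.List.dedup players).length - 1)).reverse.takeWhile
              (fun pr => pr.1 == pr.2)).length)
instance (players : List Int) : Decidable (Pre_go players) := by unfold Pre_go; infer_instance

def pvWitness_go : List Int := [1, 2]

def Spec_go (players : List Int) (out : List (List Int)) : Prop := out = go_alt players
instance (players : List Int) (out : List (List Int)) : Decidable (Spec_go players out) := by unfold Spec_go; infer_instance

-- ===== CLAIM (what is proved, stated in full; the proofs are below) =====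
def Claim_equal_go : Prop := ∀ (players : List Int), Dom_go players → Pre_go players → Spec_go players (go players)

-- ===== LEMMAS AND PROOFS =====
-- (the two ports agree on every input: where A would raise, both loops return none)

def dedupFrom (seen : List Int) : List Int → List Int
  | [] => []
  | x :: xs => if seen.contains x then dedupFrom seen xs else x :: dedupFrom (seen ++ [x]) xs

lemma foldl_add_eq (xs : List Int) : ∀ acc : List Int, xs.foldl PySem.Set.add acc = acc ++ dedupFrom acc xs := by
  induction xs with
  | nil => intro acc; simp [dedupFrom]
  | cons x xs ih =>
    intro acc
    simp only [List.foldl_cons, dedupFrom]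
    by_cases h : x ∈ acc
    · rw [show PySem.Set.add acc x = acc by simp [PySem.Set.add, h]]
      simp [ih, h]
    · rw [show PySem.Set.add acc x = acc ++ [x] by simp [PySem.Set.add, h]]
      simp [ih, h]

lemma dedup_eq_dedupFrom (xs : List Int) : PySem.List.dedup xs = dedupFrom [] xs := by
  have h := foldl_add_eq xs []
  simpa [PySem.List.dedup_eq_ofList, PySem.Set.ofList_eq_foldl] using h

lemma head?_filter_dedupFrom (q : Int → Bool) :
    ∀ (xs seen : List Int),
      ((dedupFrom seen xs).filter q).head? = (xs.filter (fun e => !seen.contains e && q e)).head? := by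
  intro xs
  induction xs with
  | nil => intro seen; simp [dedupFrom]
  | cons x xs ih =>
    intro seen
    simp only [dedupFrom, List.filter_cons]
    by_cases hm : x ∈ seen
    · simp [hm, ih]
    · by_cases hq : q x = true
      · simp [hm, hq]
      · have hq' : q x = false := by simpa using hq
        rw [if_neg (by simpa using hm)]
        rw [List.filter_cons, if_neg (by simp [hq']), if_neg (by simp [hq']), ih (seen ++ [x])]
        have hpred : ∀ e ∈ xs, (!(seen ++ [x]).contains e && q e) = (!seen.contains e && q e) := by
          intro e _
          by_cases he : e = x
          · subst he; simp [hq']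
          · simp [he]
        rw [List.filter_congr hpred]

-- A's receiver comprehension, rewritten as a head? over the deduplicated reversed list
lemma scrutinee_eq (players : List Int) (q : Int → Bool) :
    PySem.List.pyGet? (players.filter q) (-1)
      = ((dedupFrom [] players.reverse).filter q).head? := by
  rw [PySem.List.pyGet?_neg_one, ← List.head?_reverse, ← List.filter_reverse,
      head?_filter_dedupFrom]
  simp

lemma loopA_eq_loopB (players : List Int) :
    ∀ (it G : List Int) (gifted recvd : PySem.Dict Int Bool) (recf : Int → Bool) (paired : List (List Int)),
      (∀ p, gifted.getD p false = G.contains p) →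
      (∀ e, recvd.getD e false = recf e) →
      goLoopA players it gifted recvd paired
        = goLoopB (dedupFrom G it) ((PySem.List.dedup players.reverse).filter (fun e => !recf e)) paired := by
  intro it
  induction it with
  | nil => intro G gifted recvd recf paired _ _; simp [goLoopA, dedupFrom, goLoopB]
  | cons p rest ih =>
    intro G gifted recvd recf paired hg hr
    simp only [goLoopA, dedupFrom]
    by_cases hG : p ∈ G
    · -- already gifted: A skips, dedupFrom drops p
      rw [hg p, show G.contains p = true by simpa using hG]
      rw [show (true == false) = false from rfl]
      rw [if_neg (by simp)]
      rw [if_pos rfl]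
      exact ih G gifted recvd recf paired hg hr
    · rw [hg p, show G.contains p = false by simpa using hG]
      rw [show (false == false) = true from rfl]
      rw [if_pos rfl]
      rw [if_neg (by simp)]
      -- rewrite A's filter predicate through hr
      have hfc : players.filter (fun ele => ele != p && (recvd.getD ele false == false))
          = players.filter (fun ele => ele != p && !recf ele) := by
        apply List.filter_congr
        intro e _
        rw [hr e]
        cases recf e <;> simp
      rw [hfc, scrutinee_eq players (fun ele => ele != p && !recf ele), ← dedup_eq_dedupFrom]
      have hsplit : (PySem.List.dedup players.reverse).filter (fun ele => ele != p && !recf ele)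
          = ((PySem.List.dedup players.reverse).filter (fun e => !recf e)).filter (fun e => e != p) := by
        rw [List.filter_filter]
      rw [hsplit]
      cases havl : (PySem.List.dedup players.reverse).filter (fun e => !recf e) with
      | nil =>
        simp [goLoopB, PySem.List.pyGet?]
      | cons h t =>
        have hnd : (h :: t).Nodup := havl ▸ ((PySem.List.nodup_dedup _).filter _)
        by_cases hhp : h = p
        · subst hhp
          have hnt : h ∉ t := (List.nodup_cons.mp hnd).1
          have htf : t.filter (fun e => e != h) = t := by
            apply List.filter_eq_self.mpr
            intro e he
            simp [show e ≠ h from fun hne => hnt (hne ▸ he)]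
          rw [List.filter_cons]
          simp only [bne_self_eq_false, Bool.false_eq_true, if_false, htf]
          match t, hnd, htf with
          | [], _, _ =>
            simp [goLoopB, PySem.List.pyGet?_zero_cons, PySem.List.pop?, PySem.List.pyIdx?]
          | r :: t', hnd, htf =>
            simp only [List.head?_cons, goLoopB, PySem.List.pyGet?_zero_cons]
            have hpop : PySem.List.pop? (h :: r :: t') ((1 : Int)) = some (r, h :: t') := by
              have h1 : (1 : Nat) < (h :: r :: t').length := by simp
              have := PySem.List.pop?_natCast (h :: r :: t') 1 h1
              simpa using this
            rw [if_neg (by simp)]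
            rw [hpop]
            have hrne : r ≠ h ∧ r ∉ t' := by
              constructor
              · intro hrh; exact (List.nodup_cons.mp hnd).1 (hrh ▸ List.mem_cons_self)
              · exact (List.nodup_cons.mp ((List.nodup_cons.mp hnd).2)).1
            have hstep := ih (G ++ [h]) (gifted.insert h true) (recvd.insert r true)
                (fun e => e == r || recf e) (paired ++ [[h, r]])
                (by intro e
                    rw [PySem.Dict.getD_insert]
                    by_cases hep : e = h <;> simp [hep, hG, hg e])
                (by intro e
                    rw [PySem.Dict.getD_insert]
                    by_cases her : e = r <;> simp [her, hr e])
            rw [hstep]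
            congr 1
            have hff : (PySem.List.dedup players.reverse).filter (fun e => !(e == r || recf e))
                = ((PySem.List.dedup players.reverse).filter (fun e => !recf e)).filter (fun e => e != r) := by
              rw [List.filter_filter]
              apply List.filter_congr
              intro e _
              cases her : e == r <;> cases hrf : recf e <;> simp [her, hrf] <;> simp_all
            rw [hff, havl]
            rw [List.filter_cons, List.filter_cons]
            have h1 : (h != r) = true := by
              simp only [bne_iff_ne, ne_eq]
              exact fun h2 => hrne.1 h2.symm
            have h2 : (r != r) = false := by simp
            simp only [h1, h2, if_true, Bool.false_eq_true, if_false]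
            rw [List.filter_eq_self.mpr]
            intro e he
            simp [show e ≠ r from fun hne => hrne.2 (hne ▸ he)]
        · -- h ≠ p : receiver is h
          rw [List.filter_cons]
          have hb : (h != p) = true := by simpa using hhp
          simp only [hb, if_true, List.head?_cons]
          simp only [goLoopB, PySem.List.pyGet?_zero_cons]
          rw [if_pos (by simp [hb])]
          rw [PySem.List.pop?_zero_cons]
          have hnt : h ∉ t := (List.nodup_cons.mp hnd).1
          have hstep := ih (G ++ [p]) (gifted.insert p true) (recvd.insert h true)
              (fun e => e == h || recf e) (paired ++ [[p, h]])
              (by intro e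
                  rw [PySem.Dict.getD_insert]
                  by_cases hep : e = p <;> simp [hep, hG, hg e])
              (by intro e
                  rw [PySem.Dict.getD_insert]
                  by_cases heh : e = h <;> simp [heh, hr e])
          rw [hstep]
          congr 1
          have hff : (PySem.List.dedup players.reverse).filter (fun e => !(e == h || recf e))
              = ((PySem.List.dedup players.reverse).filter (fun e => !recf e)).filter (fun e => e != h) := by
            rw [List.filter_filter]
            apply List.filter_congr
            intro e _
            cases heh : e == h <;> cases hrf : recf e <;> simp [heh, hrf] <;> simp_all
          rw [hff, havl, List.filter_cons]
          simp only [bne_self_eq_false, Bool.false_eq_true, if_false]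
          rw [List.filter_eq_self.mpr]
          intro e he
          simp [show e ≠ h from fun hne => hnt (hne ▸ he)]

lemma initDict_getD (players : List Int) (p : Int) : (goInitDict players).getD p false = false := by
  unfold goInitDict
  suffices h : ∀ (d : PySem.Dict Int Bool), (∀ q, d.getD q false = false) →
      (players.foldl (fun d p => d.insert p false) d).getD p false = false by
    exact h PySem.Dict.empty (by intro q; simp [PySem.Dict.getD_empty])
  induction players with
  | nil => intro d hd; exact hd p
  | cons x xs ih =>
    intro d hd
    simp only [List.foldl_cons]
    exact ih _ (by intro q; rw [PySem.Dict.getD_insert]; by_cases hq : q = x <;> simp [hq, hd q])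

lemma go_eq_go_alt (players : List Int) : go players = go_alt players := by
  unfold go go_alt
  have h := loopA_eq_loopB players players [] (goInitDict players) (goInitDict players)
      (fun _ => false) []
      (by intro p; rw [initDict_getD]; simp)
      (by intro e; rw [initDict_getD])
  rw [h, ← dedup_eq_dedupFrom]
  congr 1
  rw [List.filter_eq_self.mpr]
  intro e _
  simp

-- ===== VERDICT (by name: the statement is the Claim_ definition above) =====
theorem go_spec : Claim_equal_go := by
  intro players _ _
  unfold Spec_go
  exact go_eq_go_alt players
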